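-- pv_equiv track=rewrite | github.com/xFarid6/Kalaha | kalaha/game_logic.py | get_sowing_path
-- ===== SOURCE A (Python) =====
-- from typing import List, Tuple
--
-- P1_STORE = 6
--
-- P2_STORE = 13
--
-- TOTAL_PITS = 14
--
-- def get_sowing_path(board: List[int], move: int, player: int) -> List[int]:
--     """
--     Calculates the sequence of pits that receive a seed during this move.
--     Returns a list of pit indices.
--     """
--     path = []
--     seeds = board[move]
--     current_idx = move
--
--     temp_seeds = seeds
--
--     while temp_seeds > 0:
--         current_idx = (current_idx + 1) % TOTAL_PITS
--
--         # Skip opponent's store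
--         if player == 0 and current_idx == P2_STORE:
--             continue
--         if player == 1 and current_idx == P1_STORE:
--             continue
--
--         path.append(current_idx)
--         temp_seeds -= 1
--
--     return path
-- ===== SOURCE B (Python) =====
-- P1_STORE = 6
-- P2_STORE = 13
-- TOTAL_PITS = 14
--
-- def get_sowing_path(board, move, player):
--     seeds = board[move]
--     store = P2_STORE if player == 0 else (P1_STORE if player == 1 else None)
--     allowed = [i for i in range(TOTAL_PITS) if i != store]
--     nxt = (move + 1) % TOTAL_PITS
--     if nxt == store:
--         nxt = (nxt + 1) % TOTAL_PITS
--     start = allowed.index(nxt)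
--     n = len(allowed)
--     return [allowed[(start + k) % n] for k in range(seeds)]
-- ===== Notes on version B (the rewrite author's own statement) =====
-- stated objective: alternative
-- what changed: Replaces A's seed-by-seed while loop with a per-step store-skip test and 'continue' by precomputing the ordered skip-free ring of allowed pits once and emitting allowed[(start+k) % len(allowed)] for k in range(seeds) via cyclic indexing.
import Mathlib
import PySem

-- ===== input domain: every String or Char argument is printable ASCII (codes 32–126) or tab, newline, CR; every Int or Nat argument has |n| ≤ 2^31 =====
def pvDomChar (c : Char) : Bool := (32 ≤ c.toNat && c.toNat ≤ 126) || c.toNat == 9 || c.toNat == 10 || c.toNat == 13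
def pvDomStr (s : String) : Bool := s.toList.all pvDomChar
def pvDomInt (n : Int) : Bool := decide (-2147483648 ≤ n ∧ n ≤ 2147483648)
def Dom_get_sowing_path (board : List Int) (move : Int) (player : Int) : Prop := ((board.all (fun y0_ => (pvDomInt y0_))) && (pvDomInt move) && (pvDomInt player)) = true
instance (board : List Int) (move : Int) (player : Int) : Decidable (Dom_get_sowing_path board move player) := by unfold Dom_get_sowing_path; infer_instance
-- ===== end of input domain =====

-- B replaces A's seed-by-seed skip loop by a precomputed skip-free ring of allowed
-- pits indexed cyclically (same cost; objective: alternative decomposition).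

-- ===== PORT A =====
def pvSkipA (player j : Int) : Bool := (player == 0 && j == 13) || (player == 1 && j == 6)

theorem pvSkipA_next (player j : Int) (h : pvSkipA player j = true) :
    pvSkipA player (PySem.Int.mod (j + 1) 14) = false := by
  simp only [pvSkipA, Bool.or_eq_true, Bool.and_eq_true, beq_iff_eq] at h
  rcases h with ⟨hp, hj⟩ | ⟨hp, hj⟩ <;> subst hp <;> subst hj <;> decide

-- the while loop of A: s is the remaining temp_seeds (as a Nat; the loop runs while temp_seeds > 0)
def pvLoopA (player cur : Int) (s : Nat) : List Int :=
  if s = 0 then []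
  else if pvSkipA player (PySem.Int.mod (cur + 1) 14) then
    pvLoopA player (PySem.Int.mod (cur + 1) 14) s
  else
    (PySem.Int.mod (cur + 1) 14) :: pvLoopA player (PySem.Int.mod (cur + 1) 14) (s - 1)
termination_by 2 * s + (if pvSkipA player (PySem.Int.mod (cur + 1) 14) then 1 else 0)
decreasing_by
  · rename_i hs hskip
    rw [hskip, pvSkipA_next player _ hskip]
    simp
  · rename_i hs hskip
    rw [if_neg hskip]
    split <;> omega

def get_sowing_path (board : List Int) (move : Int) (player : Int) : List Int :=
  let seeds := PySem.List.pyGetD board move 0   -- board[move]; Pre_ guarantees the index is in range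
  pvLoopA player move seeds.toNat

-- ===== PORT B =====
def get_sowing_path_alt (board : List Int) (move : Int) (player : Int) : List Int :=
  let seeds := PySem.List.pyGetD board move 0
  let store : Option Int := if player == 0 then some 13 else if player == 1 then some 6 else none
  let allowed := (PySem.List.pyRange 0 14 1).filter (fun i => !(some i == store))
  let nxt0 := PySem.Int.mod (move + 1) 14
  let nxt := if some nxt0 == store then PySem.Int.mod (nxt0 + 1) 14 else nxt0
  let start : Nat := (PySem.List.index? allowed nxt).getD 0
  let n : Int := (allowed.length : Int)
  (PySem.List.pyRange 0 seeds 1).map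
    (fun k => PySem.List.pyGetD allowed (PySem.Int.mod ((start : Int) + k) n) 0)

-- ===== PRECONDITION & SPEC =====
-- Pre_ excludes exactly the inputs where Python A raises IndexError on board[move].
def Pre_get_sowing_path (board : List Int) (move : Int) (player : Int) : Prop :=
  PySem.Raise.InRange board.length move
instance (board : List Int) (move : Int) (player : Int) : Decidable (Pre_get_sowing_path board move player) := by unfold Pre_get_sowing_path; infer_instance

def pvWitness_get_sowing_path : List Int × Int × Int := ([4, 0, 7, 2, 1, 0, 0, 3, 0, 0, 5, 0, 0, 0], 2, 0)

def Spec_get_sowing_path (board : List Int) (move : Int) (player : Int) (out : List Int) : Prop := out = get_sowing_path_alt board move player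
instance (board : List Int) (move : Int) (player : Int) (out : List Int) : Decidable (Spec_get_sowing_path board move player out) := by unfold Spec_get_sowing_path; infer_instance

-- ===== CLAIM (what is proved, stated in full; the proofs are below) =====
def Claim_equal_get_sowing_path : Prop := ∀ (board : List Int) (move : Int) (player : Int), Dom_get_sowing_path board move player → Pre_get_sowing_path board move player → Spec_get_sowing_path board move player (get_sowing_path board move player)

-- ===== LEMMAS AND PROOFS =====

-- the combined 'advance one pit, skipping the forbidden store' step of A's loop body
def pvStep (player j : Int) : Int :=
  if pvSkipA player j then PySem.Int.mod (j + 1) 14 else j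

theorem pvLoopA_succ (player cur : Int) (s : Nat) :
    pvLoopA player cur (s + 1) =
      pvStep player (PySem.Int.mod (cur + 1) 14) ::
        pvLoopA player (pvStep player (PySem.Int.mod (cur + 1) 14)) s := by
  rw [pvLoopA, if_neg (Nat.succ_ne_zero s)]
  by_cases h : pvSkipA player (PySem.Int.mod (cur + 1) 14) = true
  · have h2 := pvSkipA_next player _ h
    rw [if_pos h, pvLoopA, if_neg (Nat.succ_ne_zero s), if_neg (by rw [h2]; simp),
        pvStep, if_pos h]
    rfl
  · rw [if_neg h, pvStep, if_neg h]
    rfl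

-- A's loop, started on a pit of the allowed ring, walks the ring cyclically
theorem pvRing (player : Int) (A : List Int)
    (hstep : ∀ m : Nat, m < A.length →
      pvStep player (PySem.Int.mod (A.getD m 0 + 1) 14) = A.getD ((m + 1) % A.length) 0) :
    ∀ (s : Nat) (m : Nat), m < A.length →
      pvLoopA player (A.getD m 0) s =
        (List.range s).map (fun k => A.getD ((m + 1 + k) % A.length) 0) := by
  intro s
  induction s with
  | zero => intro m _; rw [pvLoopA]; simp
  | succ s ih =>
    intro m hm
    have hL : 0 < A.length := by omega
    rw [pvLoopA_succ, hstep m hm, ih ((m + 1) % A.length) (Nat.mod_lt _ hL),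
        List.range_succ_eq_map, List.map_cons, List.map_map]
    refine congrArg₂ _ (by simp) ?_
    apply List.map_congr_left
    intro k _
    simp only [Function.comp_apply]
    congr 1
    rw [Nat.add_assoc, Nat.mod_add_mod]
    congr 1
    omega

-- full characterisation of A's loop from an arbitrary start index
theorem pvTop (player : Int) (A : List Int)
    (hstep : ∀ m : Nat, m < A.length →
      pvStep player (PySem.Int.mod (A.getD m 0 + 1) 14) = A.getD ((m + 1) % A.length) 0)
    (move : Int) (start : Nat) (hstart : start < A.length)
    (hfirst : pvStep player (PySem.Int.mod (move + 1) 14) = A.getD start 0) :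
    ∀ s : Nat, pvLoopA player move s =
      (List.range s).map (fun k => A.getD ((start + k) % A.length) 0) := by
  intro s
  cases s with
  | zero => rw [pvLoopA]; simp
  | succ s =>
    rw [pvLoopA_succ, hfirst, pvRing player A hstep s start hstart,
        List.range_succ_eq_map, List.map_cons, List.map_map]
    refine congrArg₂ _ ?_ ?_
    · rw [Nat.add_zero, Nat.mod_eq_of_lt hstart]
    · apply List.map_congr_left
      intro k _
      simp only [Function.comp_apply]
      congr 2
      omega

-- B's cyclic-index comprehension, in Nat form
theorem pvBmap (A : List Int) (seeds : Int) (start : Nat) :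
    (PySem.List.pyRange 0 seeds 1).map
        (fun k => PySem.List.pyGetD A (PySem.Int.mod ((start : Int) + k) (A.length : Int)) 0) =
      (List.range seeds.toNat).map (fun k => A.getD ((start + k) % A.length) 0) := by
  rw [PySem.List.pyRange_one]
  simp only [Int.sub_zero, List.map_map]
  apply List.map_congr_left
  intro k _
  simp only [Function.comp_apply]
  rw [show (start : Int) + (0 + (k : Int)) = ((start + k : Nat) : Int) by push_cast; ring,
      PySem.Int.mod_natCast, PySem.List.pyGetD_natCast]

theorem pvStep_ite (player j : Int) :
    (if pvSkipA player j = true then PySem.Int.mod (j + 1) 14 else j) = pvStep player j := rfl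

def pvA0 : List Int := [0, 1, 2, 3, 4, 5, 6, 7, 8, 9, 10, 11, 12]
def pvA1 : List Int := [0, 1, 2, 3, 4, 5, 7, 8, 9, 10, 11, 12, 13]
def pvA2 : List Int := [0, 1, 2, 3, 4, 5, 6, 7, 8, 9, 10, 11, 12, 13]

theorem pvStep0_ring : ∀ m : Nat, m < pvA0.length →
    pvStep 0 (PySem.Int.mod (pvA0.getD m 0 + 1) 14) = pvA0.getD ((m + 1) % pvA0.length) 0 := by decide

theorem pvStep1_ring : ∀ m : Nat, m < pvA1.length →
    pvStep 1 (PySem.Int.mod (pvA1.getD m 0 + 1) 14) = pvA1.getD ((m + 1) % pvA1.length) 0 := by decide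

theorem pvKey0 : ∀ m : Nat, m < 14 →
    pvStep 0 ((m : Int)) = pvA0.getD ((PySem.List.index? pvA0 (pvStep 0 ((m : Int)))).getD 0) 0 ∧
      (PySem.List.index? pvA0 (pvStep 0 ((m : Int)))).getD 0 < pvA0.length := by decide

theorem pvKey1 : ∀ m : Nat, m < 14 →
    pvStep 1 ((m : Int)) = pvA1.getD ((PySem.List.index? pvA1 (pvStep 1 ((m : Int)))).getD 0) 0 ∧
      (PySem.List.index? pvA1 (pvStep 1 ((m : Int)))).getD 0 < pvA1.length := by decide

theorem pvKey2 : ∀ m : Nat, m < 14 →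
    ((m : Int)) = pvA2.getD ((PySem.List.index? pvA2 ((m : Int))).getD 0) 0 ∧
      (PySem.List.index? pvA2 ((m : Int))).getD 0 < pvA2.length := by decide

theorem get_sowing_path_spec' (board : List Int) (move : Int) (player : Int)
    (hpre : Pre_get_sowing_path board move player) :
    get_sowing_path board move player = get_sowing_path_alt board move player := by
  simp only [get_sowing_path, get_sowing_path_alt]
  have h0le : (0 : Int) ≤ PySem.Int.mod (move + 1) 14 := PySem.Int.mod_nonneg _ (by norm_num)
  have hlt : PySem.Int.mod (move + 1) 14 < 14 := PySem.Int.mod_lt _ (by norm_num)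
  obtain ⟨m, hm, hmlt⟩ : ∃ m : Nat, PySem.Int.mod (move + 1) 14 = (m : Int) ∧ m < 14 :=
    ⟨(PySem.Int.mod (move + 1) 14).toNat, (Int.toNat_of_nonneg h0le).symm, by omega⟩
  by_cases h0 : player = 0
  · subst h0
    rw [show (if ((0:Int) == 0) = true then some (13:Int) else if ((0:Int) == 1) = true then some 6 else none) = some 13 from rfl]
    rw [show (List.filter (fun i => !(some i == some (13:Int))) (PySem.List.pyRange 0 14 1)) = pvA0 from by decide]
    simp only [show ∀ j : Int, (some j == some (13:Int)) = pvSkipA 0 j from fun j => by simp [pvSkipA]]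
    rw [pvStep_ite, pvBmap, pvTop 0 pvA0 pvStep0_ring move _ (pvKey0 m hmlt).2 (by rw [hm]; exact (pvKey0 m hmlt).1), hm]
  · by_cases h1 : player = 1
    · subst h1
      rw [show (if ((1:Int) == 0) = true then some (13:Int) else if ((1:Int) == 1) = true then some 6 else none) = some 6 from rfl]
      rw [show (List.filter (fun i => !(some i == some (6:Int))) (PySem.List.pyRange 0 14 1)) = pvA1 from by decide]
      simp only [show ∀ j : Int, (some j == some (6:Int)) = pvSkipA 1 j from fun j => by simp [pvSkipA]]
      rw [pvStep_ite, pvBmap, pvTop 1 pvA1 pvStep1_ring move _ (pvKey1 m hmlt).2 (by rw [hm]; exact (pvKey1 m hmlt).1), hm]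
    · have hsf : ∀ j : Int, pvSkipA player j = false := by
        intro j; simp [pvSkipA, h0, h1]
      have hid : ∀ j : Int, pvStep player j = j := by
        intro j; rw [pvStep, hsf]; simp
      rw [show (if (player == 0) = true then some (13:Int) else if (player == 1) = true then some 6 else none) = none from by simp [h0, h1]]
      rw [show (List.filter (fun i => !(some i == (none : Option Int))) (PySem.List.pyRange 0 14 1)) = pvA2 from by decide]
      simp only [show ∀ j : Int, ((some j == (none : Option Int)) = true) = False from fun j => by simp, if_false]
      have hstep2 : ∀ k : Nat, k < pvA2.length →
          pvStep player (PySem.Int.mod (pvA2.getD k 0 + 1) 14) = pvA2.getD ((k + 1) % pvA2.length) 0 := by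
        intro k hk
        rw [hid]
        revert hk; revert k; decide
      rw [pvBmap, pvTop player pvA2 hstep2 move _ (pvKey2 m hmlt).2 (by rw [hm, hid]; exact (pvKey2 m hmlt).1), hm]

-- ===== VERDICT (by name: the statement is the Claim_ definition above) =====
theorem get_sowing_path_spec : Claim_equal_get_sowing_path := by
  intro board move player _ hpre
  exact get_sowing_path_spec' board move player hpre
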